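-- pv_equiv track=rewrite | github.com/VWmin/graph | dec_pll_weighted.py | remove_affected_labels
-- ===== SOURCE A (Python) =====
-- def remove_affected_labels(L, AX, AY):
--     for v in AX:
--         for u in AY:
--             if u in L[v].keys():
--                 del L[v][u]
--     for v in AY:
--         for u in AX:
--             if u in L[v].keys():
--                 del L[v][u]
--     return L
-- ===== SOURCE B (Python) =====
-- def remove_affected_labels(L, AX, AY):
--     if AX and AY:
--         ax, ay = set(AX), set(AY)
--         for v in ax | ay:
--             drop = (ay if v in ax else set()) | (ax if v in ay else set())
--             L[v] = {u: w for u, w in L[v].items() if u not in drop}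
--     return L
-- ===== Notes on version B (the rewrite author's own statement) =====
-- stated objective: alternative
-- what changed: A runs two nested passes over the vertex sets, membership-testing and deleting each cross key of L[v] one at a time; B returns immediately when either set is empty (no cross pairs exist) and otherwise makes one pass over the union of the two vertex sets, rebuilding each affected label dict with a single comprehension filtered against a per-vertex drop set.
import Mathlib
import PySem

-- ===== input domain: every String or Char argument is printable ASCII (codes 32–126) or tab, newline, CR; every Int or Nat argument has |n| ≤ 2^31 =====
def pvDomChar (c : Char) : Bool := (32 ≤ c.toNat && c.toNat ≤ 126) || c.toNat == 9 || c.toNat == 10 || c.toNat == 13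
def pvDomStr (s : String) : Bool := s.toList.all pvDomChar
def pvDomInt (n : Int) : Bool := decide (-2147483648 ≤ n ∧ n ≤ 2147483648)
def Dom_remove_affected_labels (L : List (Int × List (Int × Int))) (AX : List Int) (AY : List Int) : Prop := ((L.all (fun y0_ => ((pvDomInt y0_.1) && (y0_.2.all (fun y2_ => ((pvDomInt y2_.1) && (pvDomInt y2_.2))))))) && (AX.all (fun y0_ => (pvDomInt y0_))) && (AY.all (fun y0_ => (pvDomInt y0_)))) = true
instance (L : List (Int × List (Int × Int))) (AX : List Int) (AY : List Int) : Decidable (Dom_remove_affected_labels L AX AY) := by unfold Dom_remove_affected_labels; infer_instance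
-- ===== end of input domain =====

-- B replaces A's two nested deletion passes over the vertex sets by: nothing to do when either
-- set is empty (no cross pairs), otherwise one pass over the UNION of the two vertex sets that
-- rebuilds each affected label dict with a single comprehension against a per-vertex drop set.
-- Equivalence is about the RETURN value: both Pythons mutate L in place, but A deletes keys from
-- the stored dicts while B rebinds L[v] to a fresh dict.

-- Dict primitives on the association-list representation of a Python dict (keys unique;
-- get = first match, del removes the entry, L[v] = ... overwrites in place).  Shared by both ports.
def pyDictGet? {α : Type} (d : List (Int × α)) (k : Int) : Option α :=
  match d with
  | [] => none
  | (k', v) :: t => if k' = k then some v else pyDictGet? t k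

def pyDictSet {α : Type} (d : List (Int × α)) (k : Int) (x : α) : List (Int × α) :=
  match d with
  | [] => []
  | (k', v) :: t => if k' = k then (k', x) :: t else (k', v) :: pyDictSet t k x

def pyDictDel {α : Type} (d : List (Int × α)) (k : Int) : List (Int × α) :=
  match d with
  | [] => []
  | (k', v) :: t => if k' = k then t else (k', v) :: pyDictDel t k

-- ===== PORT A =====
def remove_affected_labels (L : List (Int × List (Int × Int))) (AX : List Int) (AY : List Int) : List (Int × List (Int × Int)) :=
  let L1 := AX.foldl (fun acc v =>
    AY.foldl (fun acc u =>
      match pyDictGet? acc v with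
      | none => acc      -- L[v] raises KeyError in Python; excluded by Pre_
      | some d => if (pyDictGet? d u).isSome then pyDictSet acc v (pyDictDel d u) else acc) acc) L
  AY.foldl (fun acc v =>
    AX.foldl (fun acc u =>
      match pyDictGet? acc v with
      | none => acc      -- KeyError; excluded by Pre_
      | some d => if (pyDictGet? d u).isSome then pyDictSet acc v (pyDictDel d u) else acc) acc) L1

-- ===== PORT B =====
-- 'for v in ax | ay': each vertex's entry is rebuilt once, independently of the others, so the
-- result cannot depend on the set's (hash) iteration order; the port iterates PySem.Set.union's
-- first-occurrence order, which is exact for the returned value.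
-- (Source B's locals ax = set(AX), ay = set(AY) and the per-vertex drop set are inlined here)
def remove_affected_labels_alt (L : List (Int × List (Int × Int))) (AX : List Int) (AY : List Int) : List (Int × List (Int × Int)) :=
  if AX.isEmpty || AY.isEmpty then L
  else
    (PySem.Set.union (PySem.Set.ofList AX) (PySem.Set.ofList AY)).foldl (fun acc v =>
      match pyDictGet? acc v with
      | none => acc   -- L[v] raises KeyError in Python; excluded by Pre_
      | some d => pyDictSet acc v (d.filter (fun e =>
          !(PySem.Set.contains (PySem.Set.union
              (if PySem.Set.contains (PySem.Set.ofList AX) v then PySem.Set.ofList AY else PySem.Set.empty)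
              (if PySem.Set.contains (PySem.Set.ofList AY) v then PySem.Set.ofList AX else PySem.Set.empty)) e.1)))) L

-- ===== PRECONDITION & SPEC =====
-- Pre_ excludes (a) exactly the inputs on which A raises KeyError (a vertex of AX absent from L
-- while AY is nonempty, or symmetrically) — B raises exactly there too — and (b) association
-- lists whose outer or inner key lists have duplicates, which represent no Python dict.
def Pre_remove_affected_labels (L : List (Int × List (Int × Int))) (AX : List Int) (AY : List Int) : Prop :=
  (AY ≠ [] → ∀ v ∈ AX, v ∈ L.map Prod.fst) ∧
  (AX ≠ [] → ∀ v ∈ AY, v ∈ L.map Prod.fst) ∧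
  (L.map Prod.fst).Nodup ∧ (∀ p ∈ L, (p.2.map Prod.fst).Nodup)
instance (L : List (Int × List (Int × Int))) (AX : List Int) (AY : List Int) : Decidable (Pre_remove_affected_labels L AX AY) := by unfold Pre_remove_affected_labels; infer_instance

def pvWitness_remove_affected_labels : (List (Int × List (Int × Int))) × List Int × List Int :=
  ([(0, [(1, 5), (2, 7)]), (1, [(0, 5)])], [0], [1])

def Spec_remove_affected_labels (L : List (Int × List (Int × Int))) (AX : List Int) (AY : List Int) (out : List (Int × List (Int × Int))) : Prop := out = remove_affected_labels_alt L AX AY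
instance (L : List (Int × List (Int × Int))) (AX : List Int) (AY : List Int) (out : List (Int × List (Int × Int))) : Decidable (Spec_remove_affected_labels L AX AY out) := by unfold Spec_remove_affected_labels; infer_instance

-- ===== CLAIM (what is proved, stated in full; the proofs are below) =====
def Claim_equal_remove_affected_labels : Prop := ∀ (L : List (Int × List (Int × Int))) (AX : List Int) (AY : List Int), Dom_remove_affected_labels L AX AY → Pre_remove_affected_labels L AX AY → Spec_remove_affected_labels L AX AY (remove_affected_labels L AX AY)

-- ===== LEMMAS AND PROOFS =====

theorem pyDictGet?_eq_none_iff {α : Type} (d : List (Int × α)) (k : Int) :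
    pyDictGet? d k = none ↔ k ∉ d.map Prod.fst := by
  induction d with
  | nil => simp [pyDictGet?]
  | cons p t ih =>
    obtain ⟨k', v⟩ := p
    by_cases hk : k' = k
    · simp [pyDictGet?, hk]
    · simp only [pyDictGet?, if_neg hk, List.map_cons, List.mem_cons, ih]
      constructor
      · rintro h (he | hm)
        · exact hk he.symm
        · exact h hm
      · exact fun h hm => h (Or.inr hm)

theorem pyDictGet?_mem {α : Type} (d : List (Int × α)) (k : Int) (x : α)
    (h : pyDictGet? d k = some x) : (k, x) ∈ d := by
  induction d with
  | nil => simp [pyDictGet?] at h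
  | cons p t ih =>
    obtain ⟨k', v⟩ := p
    by_cases hk : k' = k
    · simp only [pyDictGet?, if_pos hk] at h
      subst hk; injection h with h; subst h
      exact List.mem_cons_self
    · simp only [pyDictGet?, if_neg hk] at h
      exact List.mem_cons_of_mem _ (ih h)

-- `del` on an absent key is the identity.
theorem pyDictDel_of_get?_none {α : Type} (d : List (Int × α)) (u : Int)
    (h : pyDictGet? d u = none) : pyDictDel d u = d := by
  induction d with
  | nil => rfl
  | cons p t ih =>
    obtain ⟨k', v⟩ := p
    by_cases hk : k' = u
    · simp [pyDictGet?, hk] at h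
    · simp [pyDictGet?, hk] at h
      simp [pyDictDel, hk, ih h]

theorem pyDictGet?_pyDictSet_self {α : Type} (d : List (Int × α)) (k : Int) (x : α)
    (h : (pyDictGet? d k).isSome) : pyDictGet? (pyDictSet d k x) k = some x := by
  induction d with
  | nil => simp [pyDictGet?] at h
  | cons p t ih =>
    obtain ⟨k', v⟩ := p
    by_cases hk : k' = k
    · simp [pyDictSet, pyDictGet?, hk]
    · simp [pyDictGet?, hk] at h
      simp [pyDictSet, pyDictGet?, hk, ih h]

-- writing back the value already stored changes nothing
theorem pyDictSet_get?_self {α : Type} (d : List (Int × α)) (k : Int) (x : α)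
    (h : pyDictGet? d k = some x) : pyDictSet d k x = d := by
  induction d with
  | nil => rfl
  | cons p t ih =>
    obtain ⟨k', v⟩ := p
    by_cases hk : k' = k
    · simp only [pyDictGet?, if_pos hk] at h
      injection h with h
      simp [pyDictSet, hk, h]
    · simp only [pyDictGet?, if_neg hk] at h
      simp [pyDictSet, hk, ih h]

theorem pyDictSet_pyDictSet {α : Type} (d : List (Int × α)) (k : Int) (x y : α) :
    pyDictSet (pyDictSet d k x) k y = pyDictSet d k y := by
  induction d with
  | nil => rfl
  | cons p t ih =>
    obtain ⟨k', v⟩ := p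
    by_cases hk : k' = k
    · simp [pyDictSet, hk]
    · simp [pyDictSet, hk, ih]

-- on a duplicate-free key list, `del` is a filter
theorem pyDictDel_eq_filter {α : Type} (d : List (Int × α)) (u : Int)
    (hnd : (d.map Prod.fst).Nodup) : pyDictDel d u = d.filter (fun p => p.1 ≠ u) := by
  induction d with
  | nil => rfl
  | cons p t ih =>
    obtain ⟨k', v⟩ := p
    simp only [List.map_cons, List.nodup_cons] at hnd
    by_cases hk : k' = u
    · subst hk
      have ht : List.filter (fun p => !decide (p.1 = k')) t = t :=
        List.filter_eq_self.mpr (fun q hq => by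
          simp only [Bool.not_eq_eq_eq_not, Bool.not_true, decide_eq_false_iff_not]
          exact fun he => hnd.1 (he ▸ List.mem_map_of_mem hq))
      simp [pyDictDel, ht]
    · simp [pyDictDel, hk, ih hnd.2]

theorem nodup_keys_filter {α : Type} (d : List (Int × α)) (q : Int × α → Bool)
    (hnd : (d.map Prod.fst).Nodup) : ((d.filter q).map Prod.fst).Nodup :=
  (List.Sublist.map Prod.fst List.filter_sublist).nodup hnd

-- folding `del` over a list of keys filters them all out
theorem foldl_pyDictDel_eq_filter {α : Type} (ys : List Int) (d : List (Int × α))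
    (hnd : (d.map Prod.fst).Nodup) :
    ys.foldl pyDictDel d = d.filter (fun p => p.1 ∉ ys) := by
  induction ys generalizing d with
  | nil => simp
  | cons u ys ih =>
    have h1 : pyDictDel d u = d.filter (fun p => p.1 ≠ u) := pyDictDel_eq_filter d u hnd
    have h2 : ((d.filter (fun p => p.1 ≠ u)).map Prod.fst).Nodup := nodup_keys_filter d _ hnd
    simp only [List.foldl_cons, h1, ih _ h2]
    rw [List.filter_filter]
    apply List.filter_congr
    intro p _
    by_cases h : p.1 = u <;> simp [h]

-- A's inner loop over ys, at a fixed v, erases the ys one by one from L[v]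
theorem loopA_inner (ys : List Int) (acc : List (Int × List (Int × Int))) (v : Int) :
    ys.foldl (fun acc u =>
      match pyDictGet? acc v with
      | none => acc
      | some d => if (pyDictGet? d u).isSome then pyDictSet acc v (pyDictDel d u) else acc) acc
    = match pyDictGet? acc v with
      | none => acc
      | some d => pyDictSet acc v (ys.foldl pyDictDel d) := by
  induction ys generalizing acc with
  | nil =>
    cases hv : pyDictGet? acc v with
    | none => rfl
    | some d =>
      simp only [List.foldl_nil]
      exact (pyDictSet_get?_self acc v d hv).symm
  | cons u ys ih =>
    simp only [List.foldl_cons]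
    cases hv : pyDictGet? acc v with
    | none =>
      rw [ih]
      simp [hv]
    | some d =>
      by_cases hu : (pyDictGet? d u).isSome
      · simp only [hu, if_true]
        rw [ih]
        have hv' : pyDictGet? (pyDictSet acc v (pyDictDel d u)) v = some (pyDictDel d u) :=
          pyDictGet?_pyDictSet_self acc v _ (by simp [hv])
        simp only [hv', pyDictSet_pyDictSet]
      · simp only [hu, if_false, Bool.false_eq_true]
        rw [ih]
        have hnone : pyDictGet? d u = none := by
          cases h : pyDictGet? d u with
          | none => rfl
          | some _ => simp [h] at hu
        simp [hv, pyDictDel_of_get?_none d u hnone]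

-- a map that only rewrites the (absent) key v is the identity
theorem map_set_id {α : Type} (t : List (Int × α)) (v : Int) (x : α)
    (h : v ∉ t.map Prod.fst) :
    t.map (fun p => if p.1 = v then (v, x) else p) = t := by
  induction t with
  | nil => rfl
  | cons p t ih =>
    simp only [List.map_cons, List.mem_cons, not_or] at h ⊢
    rw [if_neg (by exact fun he => h.1 (by simp [← he])), ih h.2]

-- under duplicate-free top-level keys, overwriting entry v is a pointwise map
theorem pyDictSet_eq_map {α : Type} (acc : List (Int × α)) (v : Int) (x : α)
    (hnd : (acc.map Prod.fst).Nodup) :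
    pyDictSet acc v x = acc.map (fun p => if p.1 = v then (v, x) else p) := by
  induction acc with
  | nil => rfl
  | cons p t ih =>
    obtain ⟨k, w⟩ := p
    simp only [List.map_cons, List.nodup_cons] at hnd
    by_cases hk : k = v
    · subst hk
      simp [pyDictSet, map_set_id t k x hnd.1]
    · simp [pyDictSet, hk, ih hnd.2]

-- under duplicate-free keys, the stored value at v is the value of ANY entry with key v
theorem get?_unique {α : Type} (acc : List (Int × α)) (v : Int) (d w : α)
    (hnd : (acc.map Prod.fst).Nodup) (hget : pyDictGet? acc v = some d)
    (hmem : (v, w) ∈ acc) : w = d := by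
  induction acc with
  | nil => simp at hmem
  | cons p t ih =>
    obtain ⟨k, x⟩ := p
    simp only [List.map_cons, List.nodup_cons] at hnd
    rcases List.mem_cons.mp hmem with h | h
    · injection h with h1 h2
      subst h1; subst h2
      simp only [pyDictGet?] at hget
      injection hget
    · have hk : k ≠ v := fun he => hnd.1 (he ▸ List.mem_map_of_mem h)
      simp only [pyDictGet?, if_neg hk] at hget
      exact ih hnd.2 hget h

-- the invariant: every stored label dict has duplicate-free keys
def InvKeys (L : List (Int × List (Int × Int))) : Prop :=
  ∀ p ∈ L, (p.2.map Prod.fst).Nodup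

-- A's per-vertex step, in pointwise-map normal form
theorem stepA_eq (ys : List Int) (acc : List (Int × List (Int × Int))) (v : Int)
    (hnd : (acc.map Prod.fst).Nodup) (hinv : InvKeys acc) :
    (ys.foldl (fun acc u =>
      match pyDictGet? acc v with
      | none => acc
      | some d => if (pyDictGet? d u).isSome then pyDictSet acc v (pyDictDel d u) else acc) acc)
    = acc.map (fun p => if p.1 = v then (p.1, p.2.filter (fun e => e.1 ∉ ys)) else p) := by
  rw [loopA_inner]
  cases hv : pyDictGet? acc v with
  | none =>
    have hvm : v ∉ acc.map Prod.fst := (pyDictGet?_eq_none_iff acc v).mp hv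
    refine ((List.map_congr_left (fun p hp => ?_)).trans (List.map_id acc)).symm
    have hne : p.1 ≠ v := fun he => hvm (he ▸ List.mem_map_of_mem hp)
    simp [hne]
  | some d =>
    have hd : (d.map Prod.fst).Nodup := hinv _ (pyDictGet?_mem acc v d hv)
    simp only
    rw [foldl_pyDictDel_eq_filter _ d hd, pyDictSet_eq_map _ _ _ hnd]
    apply List.map_congr_left
    intro p hp
    by_cases hk : p.1 = v
    · have : p.2 = d := get?_unique acc v d p.2 hnd hv (by rw [← hk]; exact hp)
      simp [hk, this]
    · simp [hk]

-- keys survive any entry-rewriting map; inner nodup survives the pass map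
theorem keys_map_fst {α : Type} (acc : List (Int × α)) (F : Int × α → Int × α)
    (h : ∀ p, (F p).1 = p.1) : (acc.map F).map Prod.fst = acc.map Prod.fst := by
  rw [List.map_map]
  exact List.map_congr_left (fun p _ => h p)

theorem inv_map_filter (acc : List (Int × List (Int × Int))) (F : Int × List (Int × Int) → Int × List (Int × Int))
    (h : ∀ p, (F p).2 = p.2 ∨ ∃ q, (F p).2 = p.2.filter q) (hinv : InvKeys acc) :
    InvKeys (acc.map F) := by
  intro p hp
  obtain ⟨p', hp', he⟩ := List.mem_map.mp hp
  rcases h p' with h' | ⟨q, h'⟩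
  · rw [← he, h']; exact hinv _ hp'
  · rw [← he, h']; exact nodup_keys_filter p'.2 q (hinv _ hp')

-- one whole pass of A: filter the opposite set out of every vertex of vs
theorem passA_eq (vs ys : List Int) (acc : List (Int × List (Int × Int)))
    (hnd : (acc.map Prod.fst).Nodup) (hinv : InvKeys acc) :
    (vs.foldl (fun acc v =>
      ys.foldl (fun acc u =>
        match pyDictGet? acc v with
        | none => acc
        | some d => if (pyDictGet? d u).isSome then pyDictSet acc v (pyDictDel d u) else acc) acc) acc)
    = acc.map (fun p => if p.1 ∈ vs then (p.1, p.2.filter (fun e => e.1 ∉ ys)) else p) := by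
  induction vs generalizing acc with
  | nil =>
    simp only [List.foldl_nil]
    refine ((List.map_congr_left (fun p _ => ?_)).trans (List.map_id acc)).symm
    simp
  | cons v vs ih =>
    simp only [List.foldl_cons]
    rw [stepA_eq ys acc v hnd hinv]
    rw [ih _ (by rw [keys_map_fst _ _ (fun p => by by_cases hk : p.1 = v <;> simp [hk])]; exact hnd)
      (inv_map_filter acc _ (fun p => by
        by_cases hk : p.1 = v
        · exact Or.inr ⟨_, by rw [if_pos hk]⟩
        · exact Or.inl (by rw [if_neg hk])) hinv)]
    rw [List.map_map]
    apply List.map_congr_left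
    intro p _
    by_cases hk : p.1 = v
    · by_cases hx : p.1 ∈ vs <;>
        simp [Function.comp, hk, List.filter_filter, Bool.and_self]
    · by_cases hx : p.1 ∈ vs <;> simp [Function.comp, hk, hx]

-- the step 'L[v] = {u: w for u, w in L[v].items() if ...}', in pointwise-map normal form
theorem setFilter_eq_map (acc : List (Int × List (Int × Int))) (v : Int) (q : Int × Int → Bool)
    (hnd : (acc.map Prod.fst).Nodup) :
    (match pyDictGet? acc v with
      | none => acc
      | some d => pyDictSet acc v (d.filter q))
    = acc.map (fun p => if p.1 = v then (p.1, p.2.filter q) else p) := by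
  cases hv : pyDictGet? acc v with
  | none =>
    have hvm : v ∉ acc.map Prod.fst := (pyDictGet?_eq_none_iff acc v).mp hv
    refine ((List.map_congr_left (fun p hp => ?_)).trans (List.map_id acc)).symm
    have hne : p.1 ≠ v := fun he => hvm (he ▸ List.mem_map_of_mem hp)
    simp [hne]
  | some d =>
    simp only
    rw [pyDictSet_eq_map _ _ _ hnd]
    apply List.map_congr_left
    intro p hp
    by_cases hk : p.1 = v
    · have : p.2 = d := get?_unique acc v d p.2 hnd hv (by rw [← hk]; exact hp)
      simp [hk, this]
    · simp [hk]

-- B's single pass over a duplicate-free vertex list, vertex-dependent filter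
theorem passB_eq (q : Int → Int × Int → Bool) (vs : List Int) (acc : List (Int × List (Int × Int)))
    (hvs : vs.Nodup) (hnd : (acc.map Prod.fst).Nodup) :
    (vs.foldl (fun acc v =>
      match pyDictGet? acc v with
      | none => acc
      | some d => pyDictSet acc v (d.filter (q v))) acc)
    = acc.map (fun p => if p.1 ∈ vs then (p.1, p.2.filter (q p.1)) else p) := by
  induction vs generalizing acc with
  | nil =>
    simp only [List.foldl_nil]
    refine ((List.map_congr_left (fun p _ => ?_)).trans (List.map_id acc)).symm
    simp
  | cons v vs ih =>
    obtain ⟨hv, hvs'⟩ := List.nodup_cons.mp hvs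
    simp only [List.foldl_cons]
    rw [setFilter_eq_map acc v (q v) hnd]
    rw [ih _ hvs' (by rw [keys_map_fst _ _ (fun p => by by_cases hk : p.1 = v <;> simp [hk])]; exact hnd)]
    rw [List.map_map]
    apply List.map_congr_left
    intro p _
    simp only [Function.comp]
    by_cases hk : p.1 = v
    · simp [hk, hv]
    · by_cases hx : p.1 ∈ vs <;> simp [hk, hx]

-- PySem.Set.union of duplicate-free sets is duplicate-free
theorem nodup_set_add (s : PySem.Set Int) (x : Int) (h : s.Nodup) : (PySem.Set.add s x).Nodup := by
  unfold PySem.Set.add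
  split
  · exact h
  · next hc =>
    have hx : x ∉ s := by simpa [PySem.Set.contains] using hc
    simp only [List.nodup_append, List.nodup_singleton, h, true_and]
    intro a ha b hb
    have : b = x := by simpa using hb
    subst this
    exact fun he => hx (he ▸ ha)
theorem nodup_foldl_add (ys : List Int) : ∀ (s : PySem.Set Int), s.Nodup → (ys.foldl PySem.Set.add s).Nodup := by
  induction ys with
  | nil => exact fun s h => h
  | cons y ys ih => exact fun s h => ih _ (nodup_set_add s y h)
theorem nodup_union (xs ys : List Int) : (PySem.Set.union (PySem.Set.ofList xs) ys).Nodup :=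
  nodup_foldl_add ys _ (PySem.Set.nodup_ofList xs)

-- the per-vertex drop set of B, as a boolean membership formula
theorem drop_contains (AX AY : List Int) (v u : Int) :
    PySem.Set.contains (PySem.Set.union
      (if PySem.Set.contains (PySem.Set.ofList AX) v then PySem.Set.ofList AY else PySem.Set.empty)
      (if PySem.Set.contains (PySem.Set.ofList AY) v then PySem.Set.ofList AX else PySem.Set.empty)) u
    = ((decide (v ∈ AX) && decide (u ∈ AY)) || (decide (v ∈ AY) && decide (u ∈ AX))) := by
  by_cases hx : v ∈ AX <;> by_cases hy : v ∈ AY <;>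
    simp [PySem.Set.contains, PySem.Set.mem_union, PySem.Set.mem_ofList, PySem.Set.empty, hx, hy]

-- ===== VERDICT (by name: the statement is the Claim_ definition above) =====
theorem remove_affected_labels_spec : Claim_equal_remove_affected_labels := by
  intro L AX AY _hdom hpre
  obtain ⟨-, -, hnd, hinv⟩ := hpre
  unfold Spec_remove_affected_labels
  unfold remove_affected_labels remove_affected_labels_alt
  simp only
  rw [passA_eq AX AY L hnd hinv]
  rw [passA_eq AY AX _
    (by rw [keys_map_fst _ _ (fun p => by by_cases hk : p.1 ∈ AX <;> simp [hk])]; exact hnd)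
    (inv_map_filter L _ (fun p => by
      by_cases hk : p.1 ∈ AX
      · exact Or.inr ⟨_, by rw [if_pos hk]⟩
      · exact Or.inl (by rw [if_neg hk])) hinv)]
  by_cases hemp : (AX.isEmpty || AY.isEmpty) = true
  · -- either vertex set empty: A touches nothing, B returns L unchanged
    rw [if_pos hemp, List.map_map]
    refine (List.map_congr_left (fun p _ => ?_)).trans (List.map_id L)
    simp only [Function.comp, id]
    rcases Bool.or_eq_true_iff.mp hemp with h | h
    · have hAX : AX = [] := List.isEmpty_iff.mp h
      subst hAX
      rw [if_neg (by simp : ¬ p.1 ∈ ([] : List Int))]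
      by_cases hy : p.1 ∈ AY
      · have hf : p.2.filter (fun e => decide (e.1 ∉ ([] : List Int))) = p.2 :=
          List.filter_eq_self.mpr (fun e _ => by simp)
        rw [if_pos hy, hf]
      · rw [if_neg hy]
    · have hAY : AY = [] := List.isEmpty_iff.mp h
      subst hAY
      by_cases hx : p.1 ∈ AX
      · have hf : p.2.filter (fun e => decide (e.1 ∉ ([] : List Int))) = p.2 :=
          List.filter_eq_self.mpr (fun e _ => by simp)
        rw [if_pos hx, hf, if_neg (by simp : ¬ p.1 ∈ ([] : List Int))]
      · rw [if_neg hx, if_neg (by simp : ¬ p.1 ∈ ([] : List Int))]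
  · rw [if_neg hemp]
    rw [passB_eq _ _ L (nodup_union AX (PySem.Set.ofList AY)) hnd, List.map_map]
    apply List.map_congr_left
    intro p _
    simp only [Function.comp]
    have hu : (p.1 ∈ PySem.Set.union (PySem.Set.ofList AX) (PySem.Set.ofList AY)) ↔ (p.1 ∈ AX ∨ p.1 ∈ AY) := by
      rw [PySem.Set.mem_union, PySem.Set.mem_ofList, PySem.Set.mem_ofList]
    by_cases hx : p.1 ∈ AX <;> by_cases hy : p.1 ∈ AY
    · rw [if_pos hx, if_pos hy, if_pos (hu.mpr (Or.inl hx)), List.filter_filter]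
      congr 1
      apply List.filter_congr
      intro e _
      rw [drop_contains]
      cases hA : decide (e.1 ∈ AX) <;> cases hB : decide (e.1 ∈ AY) <;> simp [hx, hy, hA, hB]
    · rw [if_pos hx, if_neg hy, if_pos (hu.mpr (Or.inl hx))]
      congr 1
      apply List.filter_congr
      intro e _
      rw [drop_contains]
      cases hB : decide (e.1 ∈ AY) <;> simp [hx, hy, hB]
    · rw [if_neg hx, if_pos hy, if_pos (hu.mpr (Or.inr hy))]
      congr 1
      apply List.filter_congr
      intro e _
      rw [drop_contains]
      cases hA : decide (e.1 ∈ AX) <;> simp [hx, hy, hA]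
    · rw [if_neg hx, if_neg hy, if_neg (fun h => (hu.mp h).elim hx hy)]
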